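-- pv_equiv track=rewrite | github.com/MrBrantCode/unitest_baseline | mut_generate/mist_train_taco/taco_4373/solution.py | calculate_nice_p_sequence_sum
-- ===== SOURCE A (Python) =====
-- def calculate_nice_p_sequence_sum(a1, p, n):
--     """
--     Calculate the sum of the Nice-P sequence of length n starting with a1 modulo p.
--
--     Parameters:
--     a1 (int): The first element of the sequence.
--     p (int): The modulus.
--     n (int): The length of the sequence.
--
--     Returns:
--     int: The sum of the Nice-P sequence or -1 if no valid sequence exists.
--     """
--
--     def gcd(a, b):
--         while b: a, b = b, a % b
--         return a
--
--     def extgcd(a, b):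
--         u0, u1 = 1, 0
--         if b == 0:
--             return u0, u1
--
--         d0, d1 = a, b
--         while 1:
--             q, r = d0 // d1, d0 % d1
--             if r == 0:
--                 return u1, (d1 - a * u1) // b
--
--             d0, d1 = d1, r
--             u0, u1 = u1, u0 - q * u1
--
--     def mod_inverse(a, p):
--         x, y = extgcd(a, p)
--         return (p + x % p) % p
--
--     if gcd(a1, p) != 1:
--         return -1
--
--     b = mod_inverse(a1, p)
--     ans = (a1 + b) * (n // 2) + (a1 if n % 2 else 0)
--     return ans
-- ===== SOURCE B (Python) =====
-- def calculate_nice_p_sequence_sum(a1, p, n):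
--     # One recursive extended-Euclid pass replaces A's three iterative helpers.
--     def eg(a, b):
--         if b == 0:
--             return (a, 1, 0)
--         g, x, y = eg(b, a % b)
--         return (g, y, x - (a // b) * y)
--
--     g, x, _ = eg(a1, p)
--     if g != 1:
--         return -1
--     b = (x % p + p) % p
--     return (a1 + b) * (n // 2) + (a1 if n % 2 else 0)
-- ===== Notes on version B (the rewrite author's own statement) =====
-- stated objective: simpler
-- what changed: Replaces the three iterative helpers (while-loop gcd, while-loop extended gcd, mod_inverse wrapper) with a single recursive extended-Euclidean function computing gcd and Bezout coefficient in one pass.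
import Mathlib
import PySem

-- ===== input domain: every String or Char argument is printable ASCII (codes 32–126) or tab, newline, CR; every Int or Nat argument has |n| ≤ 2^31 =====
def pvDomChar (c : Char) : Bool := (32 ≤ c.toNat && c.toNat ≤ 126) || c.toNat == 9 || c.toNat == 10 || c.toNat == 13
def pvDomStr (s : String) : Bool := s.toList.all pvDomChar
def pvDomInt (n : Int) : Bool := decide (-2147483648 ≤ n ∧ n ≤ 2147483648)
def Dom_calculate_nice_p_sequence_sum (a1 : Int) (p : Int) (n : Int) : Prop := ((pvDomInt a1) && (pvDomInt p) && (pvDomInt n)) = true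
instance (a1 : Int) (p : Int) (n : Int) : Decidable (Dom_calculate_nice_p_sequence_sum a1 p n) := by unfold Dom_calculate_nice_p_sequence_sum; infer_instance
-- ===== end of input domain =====

-- B replaces A's three iterative helpers (gcd, extgcd, mod_inverse) by a single
-- recursive extended-Euclidean function: simpler decomposition, same cost.

-- termination helper for the Euclidean recursions (cited by decreasing_by)
theorem pvModAbsLt (a b : Int) (hb : b ≠ 0) :
    (PySem.Int.mod a b).natAbs < b.natAbs := by
  rcases lt_or_gt_of_ne hb with h | h
  · have := PySem.Int.mod_neg_bounds a h
    omega
  · have h1 := PySem.Int.mod_nonneg a h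
    have h2 := PySem.Int.mod_lt a h
    omega

-- ===== PORT A =====
-- def gcd(a, b): while b: a, b = b, a % b; return a
def pyGcdA (a b : Int) : Int :=
  if hb : b = 0 then a
  else pyGcdA b (PySem.Int.mod a b)
termination_by b.natAbs
decreasing_by exact pvModAbsLt a b hb

-- the while-1 loop of extgcd; the 'd1 = 0' guard only makes the recursion total
-- (it is unreachable from extgcdA, whose loop keeps d1 ≠ 0)
def extgcdLoopA (a b u0 u1 d0 d1 : Int) : Int × Int :=
  if hd : d1 = 0 then (u1, PySem.Int.floordiv (d1 - a * u1) b)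
  else
    let q := PySem.Int.floordiv d0 d1
    let r := PySem.Int.mod d0 d1
    if r = 0 then (u1, PySem.Int.floordiv (d1 - a * u1) b)
    else extgcdLoopA a b u1 (u0 - q * u1) d1 r
termination_by d1.natAbs
decreasing_by exact pvModAbsLt d0 d1 hd

-- def extgcd(a, b)
def extgcdA (a b : Int) : Int × Int :=
  if b = 0 then (1, 0)
  else extgcdLoopA a b 1 0 a b

-- def mod_inverse(a, p)
def modInverseA (a p : Int) : Int :=
  PySem.Int.mod (p + PySem.Int.mod (extgcdA a p).1 p) p

def calculate_nice_p_sequence_sum (a1 : Int) (p : Int) (n : Int) : Int :=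
  if pyGcdA a1 p ≠ 1 then -1
  else
    let b := modInverseA a1 p
    (a1 + b) * PySem.Int.floordiv n 2 +
      (if PySem.Int.mod n 2 ≠ 0 then a1 else 0)

-- ===== PORT B =====
-- def eg(a, b): if b == 0: return (a,1,0); g,x,y = eg(b, a%b); return (g, y, x-(a//b)*y)
def egB (a b : Int) : Int × Int × Int :=
  if hb : b = 0 then (a, 1, 0)
  else
    let t := egB b (PySem.Int.mod a b)
    (t.1, t.2.2, t.2.1 - PySem.Int.floordiv a b * t.2.2)
termination_by b.natAbs
decreasing_by exact pvModAbsLt a b hb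

def calculate_nice_p_sequence_sum_alt (a1 : Int) (p : Int) (n : Int) : Int :=
  let t := egB a1 p
  if t.1 ≠ 1 then -1
  else
    let b := PySem.Int.mod (PySem.Int.mod t.2.1 p + p) p
    (a1 + b) * PySem.Int.floordiv n 2 +
      (if PySem.Int.mod n 2 ≠ 0 then a1 else 0)

-- ===== PRECONDITION & SPEC =====
-- Pre_ excludes exactly a1 = 1 ∧ p = 0, the only input where A (and B alike)
-- raises ZeroDivisionError in the '% p' of the modular inverse.
def Pre_calculate_nice_p_sequence_sum (a1 : Int) (p : Int) (n : Int) : Prop :=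
  ¬ (a1 = 1 ∧ p = 0)
instance (a1 : Int) (p : Int) (n : Int) : Decidable (Pre_calculate_nice_p_sequence_sum a1 p n) := by unfold Pre_calculate_nice_p_sequence_sum; infer_instance
def pvWitness_calculate_nice_p_sequence_sum : Int × Int × Int := (3, 7, 5)

def Spec_calculate_nice_p_sequence_sum (a1 : Int) (p : Int) (n : Int) (out : Int) : Prop := out = calculate_nice_p_sequence_sum_alt a1 p n
instance (a1 : Int) (p : Int) (n : Int) (out : Int) : Decidable (Spec_calculate_nice_p_sequence_sum a1 p n out) := by unfold Spec_calculate_nice_p_sequence_sum; infer_instance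

-- ===== CLAIM (what is proved, stated in full; the proofs are below) =====
def Claim_equal_calculate_nice_p_sequence_sum : Prop := ∀ (a1 : Int) (p : Int) (n : Int), Dom_calculate_nice_p_sequence_sum a1 p n → Pre_calculate_nice_p_sequence_sum a1 p n → Spec_calculate_nice_p_sequence_sum a1 p n (calculate_nice_p_sequence_sum a1 p n)

-- ===== LEMMAS AND PROOFS =====

-- B's g component is computed by the same Euclidean recursion as A's gcd helper
theorem egB_fst (a b : Int) : (egB a b).1 = pyGcdA a b := by
  unfold egB pyGcdA
  split
  · rfl
  · exact egB_fst b (PySem.Int.mod a b)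
termination_by b.natAbs
decreasing_by exact pvModAbsLt a b (by assumption)

-- Bezout identity for B's recursive extended Euclid
theorem egB_bezout (a b : Int) :
    a * (egB a b).2.1 + b * (egB a b).2.2 = (egB a b).1 := by
  unfold egB
  split
  · rename_i hb; subst hb; ring
  · rename_i hb
    have ih := egB_bezout b (PySem.Int.mod a b)
    have hmod := PySem.Int.floordiv_mul_add_mod a b
    simp only []
    linear_combination ih - (egB b (PySem.Int.mod a b)).2.2 * hmod
termination_by b.natAbs
decreasing_by exact pvModAbsLt a b (by assumption)

-- pyGcdA computes (a sign-carrying copy of) Int.gcd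
theorem pyGcdA_natAbs (a b : Int) : (pyGcdA a b).natAbs = Int.gcd a b := by
  unfold pyGcdA
  split
  · rename_i hb; subst hb; simp [Int.gcd]
  · rename_i hb
    have ih := pyGcdA_natAbs b (PySem.Int.mod a b)
    have hmod : PySem.Int.mod a b = a - b * PySem.Int.floordiv a b := by
      have := PySem.Int.floordiv_mul_add_mod a b; linarith
    rw [ih, hmod, Int.gcd_sub_mul_left_right, Int.gcd_comm]
termination_by b.natAbs
decreasing_by exact pvModAbsLt a b (by assumption)

-- loop invariant of A's extgcd: if b divides a*u0 - d0 and a*u1 - d1, the loop's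
-- first output x satisfies b ∣ a*x - pyGcdA d0 d1
theorem extgcdLoopA_inv (a b u0 u1 d0 d1 : Int) (hd : d1 ≠ 0)
    (h0 : b ∣ a * u0 - d0) (h1 : b ∣ a * u1 - d1) :
    b ∣ a * (extgcdLoopA a b u0 u1 d0 d1).1 - pyGcdA d0 d1 := by
  have hg : pyGcdA d0 d1 = pyGcdA d1 (PySem.Int.mod d0 d1) := by
    rw [pyGcdA]; simp [hd]
  rw [extgcdLoopA]
  simp only [dif_neg hd]
  split
  · rename_i hr
    have : pyGcdA d0 d1 = d1 := by rw [hg, hr, pyGcdA]; simp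
    rw [this]; exact h1
  · rename_i hr
    have ih := extgcdLoopA_inv a b u1 (u0 - PySem.Int.floordiv d0 d1 * u1) d1
      (PySem.Int.mod d0 d1) hr h1 ?_
    · rw [hg]; exact ih
    · have hmod : PySem.Int.mod d0 d1 =
          d0 - PySem.Int.floordiv d0 d1 * d1 := by
        have := PySem.Int.floordiv_mul_add_mod d0 d1; linarith
      rw [hmod]
      have : a * (u0 - PySem.Int.floordiv d0 d1 * u1) -
          (d0 - PySem.Int.floordiv d0 d1 * d1) =
          (a * u0 - d0) - PySem.Int.floordiv d0 d1 * (a * u1 - d1) := by ring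
      rw [this]
      exact dvd_sub h0 (Dvd.dvd.mul_left h1 _)
termination_by d1.natAbs
decreasing_by exact pvModAbsLt d0 d1 (by assumption)

-- Python '%' depends only on the residue class mod p (p ≠ 0)
theorem pymod_congr (x y p : Int) (hp : p ≠ 0) (h : p ∣ x - y) :
    PySem.Int.mod x p = PySem.Int.mod y p := by
  have hx := PySem.Int.floordiv_mul_add_mod x p
  have hy := PySem.Int.floordiv_mul_add_mod y p
  have hdvd : p ∣ PySem.Int.mod x p - PySem.Int.mod y p := by
    obtain ⟨k, hk⟩ := h
    exact ⟨k - PySem.Int.floordiv x p + PySem.Int.floordiv y p, by linarith [hx, hy]⟩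
  have habs : |PySem.Int.mod x p - PySem.Int.mod y p| < |p| := by
    rcases lt_or_gt_of_ne hp with h | h
    · have b1 := PySem.Int.mod_neg_bounds x h
      have b2 := PySem.Int.mod_neg_bounds y h
      rw [abs_lt]; constructor <;> [skip; skip] <;>
        simp [abs_of_neg h] at * <;> omega
    · have a1 := PySem.Int.mod_nonneg x h
      have a2 := PySem.Int.mod_lt x h
      have b1 := PySem.Int.mod_nonneg y h
      have b2 := PySem.Int.mod_lt y h
      rw [abs_of_pos h, abs_lt]; omega
  have := Int.eq_zero_of_abs_lt_dvd ((abs_dvd p _).mpr hdvd) habs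
  linarith

-- ===== VERDICT (by name: the statement is the Claim_ definition above) =====
theorem calculate_nice_p_sequence_sum_spec : Claim_equal_calculate_nice_p_sequence_sum := by
  intro a1 p n _ hpre
  unfold Spec_calculate_nice_p_sequence_sum
  simp only [calculate_nice_p_sequence_sum, calculate_nice_p_sequence_sum_alt, egB_fst]
  by_cases hg : pyGcdA a1 p = 1
  · simp only [hg, ne_eq, not_true_eq_false, if_false]
    have hp : p ≠ 0 := by
      intro hp0
      apply hpre
      refine ⟨?_, hp0⟩
      have : pyGcdA a1 0 = a1 := by rw [pyGcdA]; simp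
      rw [hp0, this] at hg; exact hg
    -- residues of the two Bezout coefficients agree mod p
    have hxA : p ∣ a1 * (extgcdA a1 p).1 - 1 := by
      have := extgcdLoopA_inv a1 p 1 0 a1 p hp (by simp) (by simp)
      rw [hg] at this
      unfold extgcdA
      rw [if_neg hp]
      exact this
    have hxB : p ∣ a1 * (egB a1 p).2.1 - 1 := by
      have hb := egB_bezout a1 p
      rw [egB_fst, hg] at hb
      exact ⟨-(egB a1 p).2.2, by linarith⟩
    have hco : IsCoprime a1 p := by
      apply Int.isCoprime_iff_gcd_eq_one.mpr
      have := pyGcdA_natAbs a1 p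
      rw [hg] at this; simpa using this.symm
    have hdiff : p ∣ (extgcdA a1 p).1 - (egB a1 p).2.1 := by
      have hmul : p ∣ ((extgcdA a1 p).1 - (egB a1 p).2.1) * a1 := by
        have : ((extgcdA a1 p).1 - (egB a1 p).2.1) * a1 =
            (a1 * (extgcdA a1 p).1 - 1) - (a1 * (egB a1 p).2.1 - 1) := by ring
        rw [this]; exact dvd_sub hxA hxB
      exact (hco.symm).dvd_of_dvd_mul_right hmul
    have hres := pymod_congr (extgcdA a1 p).1 (egB a1 p).2.1 p hp hdiff
    unfold modInverseA
    rw [hres, add_comm p (PySem.Int.mod (egB a1 p).2.1 p)]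
  · simp [hg]
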